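-- pv_equiv track=rewrite | github.com/kfuku52/cdskit | cdskit/validate.py | sequence_ambiguous_codon_counts
-- ===== SOURCE A (Python) =====
-- MISSING_CHARS = frozenset('-?.')
--
-- UNAMBIGUOUS_NT = frozenset('ACGTacgt')
--
-- _AMBIGUOUS_CODON_CLASS_CACHE = dict()
--
-- def sequence_ambiguous_codon_counts(seq):
--     ambiguous = 0
--     evaluable = 0
--     seq_len = len(seq)
--     codon_class_cache = _AMBIGUOUS_CODON_CLASS_CACHE
--     for i in range(0, seq_len - 2, 3):
--         codon = seq[i:i + 3]
--         codon_class = codon_class_cache.get(codon)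
--         if codon_class is None:
--             ch0 = codon[0]
--             ch1 = codon[1]
--             ch2 = codon[2]
--             if (ch0 in MISSING_CHARS) or (ch1 in MISSING_CHARS) or (ch2 in MISSING_CHARS):
--                 codon_class = (0, 0)
--             else:
--                 codon_class = (
--                     1,
--                     int((ch0 not in UNAMBIGUOUS_NT) or (ch1 not in UNAMBIGUOUS_NT) or (ch2 not in UNAMBIGUOUS_NT)),
--                 )
--             codon_class_cache[codon] = codon_class
--         evaluable += codon_class[0]
--         ambiguous += codon_class[1]
--     return ambiguous, evaluable
-- ===== SOURCE B (Python) =====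
-- MISSING_CHARS = frozenset('-?.')
--
-- UNAMBIGUOUS_NT = frozenset('ACGTacgt')
--
--
-- def sequence_ambiguous_codon_counts(seq):
--     codons = [seq[i:i + 3] for i in range(0, len(seq) - 2, 3)]
--     evaluable_codons = [c for c in codons if all(ch not in MISSING_CHARS for ch in c)]
--     ambiguous = sum(1 for c in evaluable_codons if any(ch not in UNAMBIGUOUS_NT for ch in c))
--     return ambiguous, len(evaluable_codons)
-- ===== Notes on version B (the rewrite author's own statement) =====
-- stated objective: simpler
-- what changed: Replaced A's single fused loop that threads two integer accumulators and a persistent per-codon memo cache with a cache-free filter-then-count decomposition: build the codon list, filter it to the evaluable codons, and count the ambiguous ones among those.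
import Mathlib
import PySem

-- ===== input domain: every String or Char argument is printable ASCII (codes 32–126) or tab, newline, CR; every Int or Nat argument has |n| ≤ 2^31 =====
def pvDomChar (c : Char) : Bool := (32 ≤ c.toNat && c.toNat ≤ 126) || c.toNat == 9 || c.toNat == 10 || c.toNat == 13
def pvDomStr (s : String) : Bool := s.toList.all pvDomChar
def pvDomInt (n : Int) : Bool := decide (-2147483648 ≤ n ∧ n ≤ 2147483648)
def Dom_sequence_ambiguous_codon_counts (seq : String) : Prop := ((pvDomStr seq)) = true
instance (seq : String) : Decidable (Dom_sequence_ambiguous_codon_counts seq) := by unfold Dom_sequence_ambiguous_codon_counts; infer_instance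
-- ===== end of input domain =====

-- B drops A's fused accumulating loop and its global memo cache (the cache is pure memoization of a
-- pure per-codon classification, so it never affects the return value) in favour of a
-- filter-then-count decomposition: build the codon list, keep the evaluable ones, count the
-- ambiguous ones among those. Objective: simpler.

-- ===== PORT A =====
def pvMissing : List Char := ['-', '?', '.']           -- MISSING_CHARS
def pvUnamb : List Char := ['A','C','G','T','a','c','g','t']   -- UNAMBIGUOUS_NT

-- the body of A's for-loop (one iteration: cache lookup, fresh classification on a miss)
def pvLoopBodyA (chars : List Char)
    (st : (Int × Int) × PySem.Dict (List Char) (Int × Int)) (i : Int) :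
    (Int × Int) × PySem.Dict (List Char) (Int × Int) :=
  let codon := PySem.List.slice chars (some i) (some (i + 3))
  match st.2.get? codon with
  | some cls => ((st.1.1 + cls.2, st.1.2 + cls.1), st.2)
  | none =>
    let cls :=
      match codon with
      | [ch0, ch1, ch2] =>
        if pvMissing.contains ch0 || pvMissing.contains ch1 || pvMissing.contains ch2 then
          ((0 : Int), (0 : Int))
        else
          (1, if !pvUnamb.contains ch0 || !pvUnamb.contains ch1 || !pvUnamb.contains ch2 then 1 else 0)
      | _ => (0, 0)   -- unreachable: every codon the loop slices has exactly 3 characters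
    ((st.1.1 + cls.2, st.1.2 + cls.1), st.2.insert codon cls)

def sequence_ambiguous_codon_counts (seq : String) : Int × Int :=
  -- the Python function reads/updates the module-level cache _AMBIGUOUS_CODON_CLASS_CACHE; it is
  -- pure memoization keyed by the codon, so the port starts from the empty cache
  (((PySem.List.pyRange 0 (PySem.Str.len seq - 2) 3).foldl (pvLoopBodyA seq.toList)
      ((0, 0), PySem.Dict.empty)).1)

-- ===== PORT B =====
def sequence_ambiguous_codon_counts_alt (seq : String) : Int × Int :=
  let chars := seq.toList
  let codons := (PySem.List.pyRange 0 (PySem.Str.len seq - 2) 3).map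
    (fun i => PySem.List.slice chars (some i) (some (i + 3)))
  let evaluableCodons := codons.filter (fun c => c.all (fun ch => !pvMissing.contains ch))
  let ambiguous := (evaluableCodons.filter (fun c => c.any (fun ch => !pvUnamb.contains ch))).length
  ((ambiguous : Int), (evaluableCodons.length : Int))

-- ===== PRECONDITION & SPEC =====
def Spec_sequence_ambiguous_codon_counts (seq : String) (out : Int × Int) : Prop := out = sequence_ambiguous_codon_counts_alt seq
instance (seq : String) (out : Int × Int) : Decidable (Spec_sequence_ambiguous_codon_counts seq out) := by unfold Spec_sequence_ambiguous_codon_counts; infer_instance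

-- ===== CLAIM (what is proved, stated in full; the proofs are below) =====
def Claim_equal_sequence_ambiguous_codon_counts : Prop := ∀ (seq : String), Dom_sequence_ambiguous_codon_counts seq → Spec_sequence_ambiguous_codon_counts seq (sequence_ambiguous_codon_counts seq)

-- ===== LEMMAS AND PROOFS =====

-- fresh classification of one codon, as a function (what A computes on a cache miss)
def pvClassify (codon : List Char) : Int × Int :=
  match codon with
  | [ch0, ch1, ch2] =>
    if pvMissing.contains ch0 || pvMissing.contains ch1 || pvMissing.contains ch2 then (0, 0)
    else (1, if !pvUnamb.contains ch0 || !pvUnamb.contains ch1 || !pvUnamb.contains ch2 then 1 else 0)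
  | _ => (0, 0)

lemma loopA_eq (chars : List Char) (l : List Int) (p : Int × Int)
    (d : PySem.Dict (List Char) (Int × Int))
    (hd : ∀ k v, d.get? k = some v → v = pvClassify k) :
    (l.foldl (pvLoopBodyA chars) (p, d)).1
      = l.foldl (fun q i =>
          (q.1 + (pvClassify (PySem.List.slice chars (some i) (some (i + 3)))).2,
           q.2 + (pvClassify (PySem.List.slice chars (some i) (some (i + 3)))).1)) p := by
  induction l generalizing p d with
  | nil => rfl
  | cons i t ih =>
    simp only [List.foldl_cons]
    rcases h : d.get? (PySem.List.slice chars (some i) (some (i + 3))) with _ | v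
    · have : pvLoopBodyA chars (p, d) i
          = ((p.1 + (pvClassify (PySem.List.slice chars (some i) (some (i + 3)))).2,
              p.2 + (pvClassify (PySem.List.slice chars (some i) (some (i + 3)))).1),
             d.insert (PySem.List.slice chars (some i) (some (i + 3)))
               (pvClassify (PySem.List.slice chars (some i) (some (i + 3))))) := by
        simp only [pvLoopBodyA, pvClassify, h]
      rw [this, ih]
      intro k v hk
      rw [PySem.Dict.get?_insert] at hk
      split at hk
      · next heq => subst heq; exact (Option.some.inj hk).symm
      · exact hd _ _ hk
    · have hv := hd _ _ h
      have : pvLoopBodyA chars (p, d) i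
          = ((p.1 + v.2, p.2 + v.1), d) := by
        simp only [pvLoopBodyA, h]
      rw [this, hv, ih _ _ hd]

lemma classify_eq (a b c : Char) :
    pvClassify [a, b, c]
      = (if [a, b, c].all (fun ch => !pvMissing.contains ch) then
           ((1 : Int), if [a, b, c].any (fun ch => !pvUnamb.contains ch) then (1 : Int) else 0)
         else (0, 0)) := by
  simp only [pvClassify, List.all_cons, List.all_nil, List.any_cons, List.any_nil]
  cases hma : pvMissing.contains a <;> cases hmb : pvMissing.contains b <;>
    cases hmc : pvMissing.contains c <;> simp [or_assoc]

lemma fold_counts (L : List (List Char)) (p : Int × Int)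
    (h3 : ∀ c ∈ L, c.length = 3) :
    L.foldl (fun q c =>
        (q.1 + (pvClassify c).2, q.2 + (pvClassify c).1)) p
      = (p.1 + (((L.filter (fun c => c.all (fun ch => !pvMissing.contains ch))).filter
                  (fun c => c.any (fun ch => !pvUnamb.contains ch))).length : Int),
         p.2 + ((L.filter (fun c => c.all (fun ch => !pvMissing.contains ch))).length : Int)) := by
  induction L generalizing p with
  | nil => simp
  | cons c t ih =>
    obtain ⟨a, b, c', rfl⟩ := List.length_eq_three.mp (h3 c (by simp))
    have ht : ∀ x ∈ t, x.length = 3 := fun x hx => h3 x (by simp [hx])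
    rw [List.foldl_cons, ih _ ht, classify_eq]
    simp only [List.filter_cons]
    cases he : ([a, b, c'].all fun ch => !pvMissing.contains ch) <;>
      cases ha : ([a, b, c'].any fun ch => !pvUnamb.contains ch) <;>
        (simp_all [List.filter_filter, Prod.ext_iff] <;> omega)

lemma foldl_body_map (chars : List Char) (l : List Int) (p : Int × Int) :
    l.foldl (fun q i =>
        (q.1 + (pvClassify (PySem.List.slice chars (some i) (some (i + 3)))).2,
         q.2 + (pvClassify (PySem.List.slice chars (some i) (some (i + 3)))).1)) p
      = (l.map (fun i => PySem.List.slice chars (some i) (some (i + 3)))).foldl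
          (fun q c => (q.1 + (pvClassify c).2, q.2 + (pvClassify c).1)) p := by
  rw [List.foldl_map]

lemma slice_len3 (chars : List Char) (i : Int)
    (hi : i ∈ PySem.List.pyRange 0 ((chars.length : Int) - 2) 3) :
    (PySem.List.slice chars (some i) (some (i + 3))).length = 3 := by
  have h := (PySem.List.mem_pyRange_iff_of_pos (by norm_num) i).mp hi
  rw [PySem.List.slice_toNat chars (show (0:Int) ≤ i by omega) (show (0:Int) ≤ i + 3 by omega)]
  simp only [List.length_take, List.length_drop]
  omega

-- ===== VERDICT (by name: the statement is the Claim_ definition above) =====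
theorem sequence_ambiguous_codon_counts_spec : Claim_equal_sequence_ambiguous_codon_counts := by
  intro seq _
  unfold Spec_sequence_ambiguous_codon_counts sequence_ambiguous_codon_counts
    sequence_ambiguous_codon_counts_alt
  rw [loopA_eq seq.toList _ _ _ (by intro k v hk; rw [PySem.Dict.get?_empty] at hk; cases hk)]
  rw [show (PySem.Str.len seq) = ((seq.toList.length : Int)) from by simp [PySem.Str.len_eq]]
  rw [foldl_body_map]
  rw [fold_counts _ _ (by
    intro c hc
    obtain ⟨i, hi, rfl⟩ := List.mem_map.mp hc
    exact slice_len3 seq.toList i hi)]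
  simp
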